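-- pv_equiv track=rewrite | github.com/thakur-patel/optics-framework | optics_framework/helper/generate.py | _parse_step
-- ===== SOURCE A (Python) =====
-- from typing import Dict, List, Tuple, Optional, Union, Any
--
-- def _parse_step(step: str, keyword_registry: set) -> Tuple[str, List[str]]:
--     parts = step.split(maxsplit=1)
--     keyword = parts[0] if parts else ""
--     params = []
--     if len(parts) > 1:
--         # Sort keywords by length in descending order to match longer keywords first
--         for reg_keyword in sorted(keyword_registry, key=len, reverse=True):
--             if step.startswith(reg_keyword):
--                 keyword = reg_keyword
--                 params = (
--                     step[len(reg_keyword) :].strip().split()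
--                     if step[len(reg_keyword) :].strip()
--                     else []
--                 )
--                 break
--         else:
--             params = parts[1].split() if parts[1] else []
--     return keyword, params
-- ===== SOURCE B (Python) =====
-- def _parse_step(step: str, keyword_registry: set):
--     parts = step.split(maxsplit=1)
--     if len(parts) <= 1:
--         return (parts[0] if parts else "", [])
--     for i in range(len(step), -1, -1):
--         prefix = step[:i]
--         if prefix in keyword_registry:
--             rest = step[i:].strip()
--             return prefix, rest.split() if rest else []
--     return parts[0], parts[1].split() if parts[1] else []
-- ===== Notes on version B (the rewrite author's own statement) =====
-- stated objective: alternative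
-- what changed: Instead of sorting the whole registry by length and scanning it for a startswith match, B walks the prefixes of step from longest to shortest and tests each for set membership, so the work depends on the step length instead of the registry size.
import Mathlib
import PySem

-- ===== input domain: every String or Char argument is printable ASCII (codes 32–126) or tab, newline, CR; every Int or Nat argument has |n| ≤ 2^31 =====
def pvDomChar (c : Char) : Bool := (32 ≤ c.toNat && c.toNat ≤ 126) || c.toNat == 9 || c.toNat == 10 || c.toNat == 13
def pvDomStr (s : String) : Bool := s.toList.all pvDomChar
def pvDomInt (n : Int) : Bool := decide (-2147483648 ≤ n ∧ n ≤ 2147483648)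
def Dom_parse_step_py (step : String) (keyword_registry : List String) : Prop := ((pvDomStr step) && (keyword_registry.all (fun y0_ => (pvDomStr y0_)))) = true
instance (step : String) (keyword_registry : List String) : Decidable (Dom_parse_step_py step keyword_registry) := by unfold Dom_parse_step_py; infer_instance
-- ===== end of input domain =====

-- B replaces A's sort of the registry by length + linear scan with a direct scan over
-- prefixes of `step` (longest first) tested for registry membership; same return value.

-- ===== PORT A =====
-- the `for … break/else` over the sorted registry: first keyword that `step` starts with
def pvAFind (step : String) : List String → Option String
  | [] => none
  | k :: rest => if PySem.Str.startswith step k then some k else pvAFind step rest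

def parse_step_py (step : String) (keyword_registry : List String) : String × List String :=
  let parts := PySem.Str.split₀Max step 1
  let keyword := match parts with | [] => "" | p :: _ => p
  if parts.length > 1 then
    match pvAFind step (PySem.List.sorted keyword_registry (fun k => PySem.Str.len k) true) with
    | some k =>
        let rest := PySem.Str.strip (PySem.Str.slice step (some (PySem.Str.len k)) none)
        (k, if rest ≠ "" then PySem.Str.split₀ rest else [])
    | none =>
        (keyword, match parts[1]? with
          | some p1 => if p1 ≠ "" then PySem.Str.split₀ p1 else []
          | none => [])
  else (keyword, [])

-- ===== PORT B =====
-- the `for i in range(len(step), -1, -1)` loop: first prefix length whose prefix is registered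
def pvBScan (step : String) (reg : List String) (i : Nat) : Option Nat :=
  if PySem.Str.slice step none (some (i : Int)) ∈ reg then some i
  else match i with
    | 0 => none
    | j+1 => pvBScan step reg j

def parse_step_py_alt (step : String) (keyword_registry : List String) : String × List String :=
  let parts := PySem.Str.split₀Max step 1
  if parts.length ≤ 1 then
    (match parts with | [] => "" | p :: _ => p, [])
  else
    match pvBScan step keyword_registry (PySem.Str.len step).toNat with
    | some i =>
        let pre := PySem.Str.slice step none (some (i : Int))
        let rest := PySem.Str.strip (PySem.Str.slice step (some (i : Int)) none)
        (pre, if rest ≠ "" then PySem.Str.split₀ rest else [])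
    | none =>
        match parts with
        | p0 :: p1 :: _ => (p0, if p1 ≠ "" then PySem.Str.split₀ p1 else [])
        | _ => ("", [])

-- ===== PRECONDITION & SPEC =====
def Spec_parse_step_py (step : String) (keyword_registry : List String) (out : String × List String) : Prop := out = parse_step_py_alt step keyword_registry
instance (step : String) (keyword_registry : List String) (out : String × List String) : Decidable (Spec_parse_step_py step keyword_registry out) := by unfold Spec_parse_step_py; infer_instance

-- ===== CLAIM (what is proved, stated in full; the proofs are below) =====
def Claim_equal_parse_step_py : Prop := ∀ (step : String) (keyword_registry : List String), Dom_parse_step_py step keyword_registry → Spec_parse_step_py step keyword_registry (parse_step_py step keyword_registry)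

-- ===== LEMMAS AND PROOFS =====

theorem pv_sliceTo_toList (s : String) (i : Nat) :
    (PySem.Str.slice s none (some (i : Int))).toList = s.toList.take i := by
  simp [PySem.List.slice_to_natCast]

theorem pv_startswith_iff (s k : String) :
    PySem.Str.startswith s k = true ↔ k.toList <+: s.toList := by
  simp [PySem.Chars.startswith_iff]

theorem pv_len_eq (s : String) : PySem.Str.len s = (s.toList.length : Int) := by
  simp [PySem.Str.len]

theorem pvBScan_none (step : String) (reg : List String) (n : Nat)
    (h : pvBScan step reg n = none) :
    ∀ j ≤ n, PySem.Str.slice step none (some (j : Int)) ∉ reg := by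
  induction n with
  | zero =>
      intro j hj
      interval_cases j
      unfold pvBScan at h
      split at h
      · exact absurd h (by simp)
      · simpa using ‹_›
  | succ m ih =>
      unfold pvBScan at h
      split at h
      · exact absurd h (by simp)
      · intro j hj
        rcases Nat.lt_or_ge j (m+1) with hlt | hge
        · exact ih h j (Nat.lt_succ_iff.mp hlt)
        · have : j = m+1 := le_antisymm hj hge
          subst this; assumption

theorem pvBScan_some (step : String) (reg : List String) (n i : Nat)
    (h : pvBScan step reg n = some i) :
    i ≤ n ∧ PySem.Str.slice step none (some (i : Int)) ∈ reg ∧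
      ∀ j, i < j → j ≤ n → PySem.Str.slice step none (some (j : Int)) ∉ reg := by
  induction n with
  | zero =>
      unfold pvBScan at h
      split at h
      · cases h; exact ⟨le_rfl, ‹_›, fun j hj hj' => by omega⟩
      · exact absurd h (by simp)
  | succ m ih =>
      unfold pvBScan at h
      split at h
      · cases h
        exact ⟨le_rfl, ‹_›, fun j hj hj' => by omega⟩
      · obtain ⟨h1, h2, h3⟩ := ih h
        refine ⟨Nat.le_succ_of_le h1, h2, ?_⟩
        intro j hj hj'
        rcases Nat.lt_or_ge j (m+1) with hlt | hge
        · exact h3 j hj (Nat.lt_succ_iff.mp hlt)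
        · have : j = m+1 := le_antisymm hj' hge
          subst this; assumption

theorem pvAFind_none (step : String) (l : List String)
    (h : pvAFind step l = none) :
    ∀ k ∈ l, ¬ k.toList <+: step.toList := by
  induction l with
  | nil => simp
  | cons a t ih =>
      unfold pvAFind at h
      split at h
      · exact absurd h (by simp)
      · intro k hk
        rcases List.mem_cons.mp hk with rfl | hk
        · intro hpre; exact ‹¬ PySem.Str.startswith step k = true› ((pv_startswith_iff _ _).mpr hpre)
        · exact ih h k hk

theorem pvAFind_some (step : String) (l : List String) (k : String)
    (hp : l.Pairwise (fun a b => PySem.Str.len b ≤ PySem.Str.len a))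
    (h : pvAFind step l = some k) :
    k ∈ l ∧ k.toList <+: step.toList ∧
      ∀ k' ∈ l, k'.toList <+: step.toList → k'.toList.length ≤ k.toList.length := by
  induction l with
  | nil => simp [pvAFind] at h
  | cons a t ih =>
      unfold pvAFind at h
      rcases List.pairwise_cons.mp hp with ⟨ha, ht⟩
      split at h
      · cases h
        refine ⟨List.mem_cons_self, (pv_startswith_iff _ _).mp ‹_›, ?_⟩
        intro k' hk' _
        rcases List.mem_cons.mp hk' with rfl | hk'
        · exact le_rfl
        · have := ha k' hk'
          have h2 := pv_len_eq k'
          have h3 := pv_len_eq k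
          omega
      · obtain ⟨h1, h2, h3⟩ := ih ht h
        refine ⟨List.mem_cons_of_mem _ h1, h2, ?_⟩
        intro k' hk' hpre
        rcases List.mem_cons.mp hk' with rfl | hk'
        · exact absurd ((pv_startswith_iff _ _).mpr hpre) ‹_›
        · exact h3 k' hk' hpre

theorem pv_string_eq_of_toList {s t : String} (h : s.toList = t.toList) : s = t := by
  simpa using congrArg String.ofList h

theorem pv_key_eq_slice (step : String) (k : String) (hpre : k.toList <+: step.toList) :
    PySem.Str.slice step none (some ((k.toList.length : Nat) : Int)) = k := by
  apply pv_string_eq_of_toList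
  rw [pv_sliceTo_toList]
  exact (List.prefix_iff_eq_take.mp hpre).symm

theorem parse_step_py_spec : Claim_equal_parse_step_py := by
  intro step reg _
  unfold Spec_parse_step_py
  show parse_step_py step reg = parse_step_py_alt step reg
  unfold parse_step_py parse_step_py_alt
  simp only []
  by_cases hlen : (PySem.Str.split₀Max step 1).length > 1
  · rw [if_pos hlen, if_neg (by omega)]
    have hn : (PySem.Str.len step).toNat = step.toList.length := by
      rw [pv_len_eq]; exact Int.toNat_natCast _
    have hp : (PySem.List.sorted reg (fun k => PySem.Str.len k) true).Pairwise
        (fun a b => PySem.Str.len b ≤ PySem.Str.len a) := PySem.List.sorted_pairwise_rev ..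
    have hmem : ∀ x, x ∈ PySem.List.sorted reg (fun k => PySem.Str.len k) true ↔ x ∈ reg :=
      fun x => PySem.List.mem_sorted ..
    cases hB : pvBScan step reg (PySem.Str.len step).toNat with
    | some i =>
        obtain ⟨hin, hmemi, hmax⟩ := pvBScan_some _ _ _ _ hB
        rw [hn] at hin
        cases hA : pvAFind step (PySem.List.sorted reg (fun k => PySem.Str.len k) true) with
        | none =>
            exfalso
            exact pvAFind_none _ _ hA _ ((hmem _).mpr hmemi)
              (by rw [pv_sliceTo_toList]; exact List.take_prefix _ _)
        | some k =>
            obtain ⟨hkmem, hkpre, hkmax⟩ := pvAFind_some _ _ _ hp hA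
            have hm_le : k.toList.length ≤ step.toList.length := hkpre.length_le
            have hkeq := pv_key_eq_slice step k hkpre
            have hkreg : k ∈ reg := (hmem _).mp hkmem
            -- k.toList.length = i
            have h1 : ¬ i < k.toList.length := by
              intro hlt
              exact hmax _ hlt (by omega) (by rw [hkeq]; exact hkreg)
            have h2 : i ≤ k.toList.length := by
              have := hkmax _ ((hmem _).mpr hmemi)
                (by rw [pv_sliceTo_toList]; exact List.take_prefix _ _)
              rw [pv_sliceTo_toList, List.length_take] at this
              omega
            have hieq : k.toList.length = i := by omega
            have hk2 : PySem.Str.slice step none (some (i : Int)) = k := by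
              rw [← hieq]; exact hkeq
            simp [hk2, hieq]
    | none =>
        have hnone := pvBScan_none _ _ _ hB
        have hA : pvAFind step (PySem.List.sorted reg (fun k => PySem.Str.len k) true) = none := by
          cases hA : pvAFind step (PySem.List.sorted reg (fun k => PySem.Str.len k) true) with
          | none => rfl
          | some k =>
              exfalso
              obtain ⟨hkmem, hkpre, _⟩ := pvAFind_some _ _ _ hp hA
              have := hnone k.toList.length (by rw [hn]; exact hkpre.length_le)
              rw [pv_key_eq_slice step k hkpre] at this
              exact this ((hmem _).mp hkmem)
        rw [hA]
        cases hparts : PySem.Str.split₀Max step 1 with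
        | nil => rw [hparts] at hlen; simp at hlen
        | cons p0 rest =>
            cases rest with
            | nil => rw [hparts] at hlen; simp at hlen
            | cons p1 rest' => simp
  · rw [if_neg hlen, if_pos (by omega)]
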